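-- pv_equiv track=rewrite | github.com/mikeg7895/fortiflow | fortiflow-django-backend/core/pagination.py | get_displayed_page_numbers
-- ===== SOURCE A (Python) =====
-- def get_displayed_page_numbers(current_page, total_pages):
--     pages = set()
--
--     for i in range(1, 3):
--         if 1 <= i <= total_pages:
--             pages.add(i)
--
--     for i in range(total_pages - 1, total_pages + 1):
--         if 1 <= i <= total_pages:
--             pages.add(i)
--
--     for i in range(current_page - 2, current_page + 3):
--         if 1 <= i <= total_pages:
--             pages.add(i)
--
--     return sorted(pages)
-- ===== SOURCE B (Python) =====
-- def get_displayed_page_numbers(current_page, total_pages):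
--     if total_pages <= 0:
--         return []
--     # edge windows {1,2} and {total_pages-1,total_pages}, clamped, as one sorted list
--     if total_pages <= 4:
--         edges = list(range(1, total_pages + 1))
--     else:
--         edges = [1, 2, total_pages - 1, total_pages]
--     # the window around the current page, clamped to [1, total_pages]
--     mid = list(range(max(current_page - 2, 1), min(current_page + 2, total_pages) + 1))
--     # merge-union of two sorted duplicate-free lists
--     out = []
--     i = j = 0
--     while i < len(edges) and j < len(mid):
--         a, b = edges[i], mid[j]
--         if a < b:
--             out.append(a); i += 1
--         elif b < a:
--             out.append(b); j += 1
--         else: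
--             out.append(a); i += 1; j += 1
--     out.extend(edges[i:])
--     out.extend(mid[j:])
--     return out
-- ===== Notes on version B (the rewrite author's own statement) =====
-- stated objective: alternative
-- what changed: Replaces the three conditional set-insertion loops followed by sorted() with a direct O(1) construction: the clamped edge pages as one already-sorted list, the clamped current-page window as a range, combined by a two-pointer sorted merge-union, so no set and no sort are needed.
import Mathlib
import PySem

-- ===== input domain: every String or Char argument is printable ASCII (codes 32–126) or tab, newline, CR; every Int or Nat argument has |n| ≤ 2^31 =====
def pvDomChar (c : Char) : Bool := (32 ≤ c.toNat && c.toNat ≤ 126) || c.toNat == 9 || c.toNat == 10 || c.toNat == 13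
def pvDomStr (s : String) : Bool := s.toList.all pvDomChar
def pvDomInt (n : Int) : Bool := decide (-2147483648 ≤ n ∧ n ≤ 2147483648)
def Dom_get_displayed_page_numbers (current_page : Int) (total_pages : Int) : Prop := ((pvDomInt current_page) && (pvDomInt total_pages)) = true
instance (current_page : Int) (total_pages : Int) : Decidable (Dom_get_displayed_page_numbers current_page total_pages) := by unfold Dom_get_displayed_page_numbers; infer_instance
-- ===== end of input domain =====

-- B replaces A's three windowed set-insertions plus final sort by an O(1) direct
-- construction: the two fixed edge windows as one sorted list, the clamped
-- current-page window as a range, combined by a sorted merge-union (objective: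
-- alternative — no set and no sort, same output).

-- ===== PORT A =====
def get_displayed_page_numbers (current_page : Int) (total_pages : Int) : List Int :=
  let pages : PySem.Set Int := PySem.Set.empty
  let pages := (PySem.List.pyRange 1 3).foldl
      (fun s i => if 1 ≤ i ∧ i ≤ total_pages then PySem.Set.add s i else s) pages
  let pages := (PySem.List.pyRange (total_pages - 1) (total_pages + 1)).foldl
      (fun s i => if 1 ≤ i ∧ i ≤ total_pages then PySem.Set.add s i else s) pages
  let pages := (PySem.List.pyRange (current_page - 2) (current_page + 3)).foldl
      (fun s i => if 1 ≤ i ∧ i ≤ total_pages then PySem.Set.add s i else s) pages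
  PySem.List.sorted pages (fun x => x)

-- ===== PORT B =====
-- merge-union of two sorted duplicate-free lists (the while-loop + extends of Source B)
def pvMergeUnion : List Int → List Int → List Int
  | [], ys => ys
  | x :: xs, [] => x :: xs
  | x :: xs, y :: ys =>
    if x < y then x :: pvMergeUnion xs (y :: ys)
    else if y < x then y :: pvMergeUnion (x :: xs) ys
    else x :: pvMergeUnion xs ys

def get_displayed_page_numbers_alt (current_page : Int) (total_pages : Int) : List Int :=
  if total_pages ≤ 0 then []
  else
    pvMergeUnion
      (if total_pages ≤ 4 then PySem.List.pyRange 1 (total_pages + 1)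
       else [1, 2, total_pages - 1, total_pages])
      (PySem.List.pyRange (max (current_page - 2) 1) (min (current_page + 2) total_pages + 1))

-- ===== PRECONDITION & SPEC =====
def Spec_get_displayed_page_numbers (current_page : Int) (total_pages : Int) (out : List Int) : Prop := out = get_displayed_page_numbers_alt current_page total_pages
instance (current_page : Int) (total_pages : Int) (out : List Int) : Decidable (Spec_get_displayed_page_numbers current_page total_pages out) := by unfold Spec_get_displayed_page_numbers; infer_instance

-- ===== CLAIM (what is proved, stated in full; the proofs are below) =====
def Claim_equal_get_displayed_page_numbers : Prop := ∀ (current_page : Int) (total_pages : Int), Dom_get_displayed_page_numbers current_page total_pages → Spec_get_displayed_page_numbers current_page total_pages (get_displayed_page_numbers current_page total_pages)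

-- ===== LEMMAS AND PROOFS =====

theorem pv_mem_mergeUnion (xs ys : List Int) (z : Int) :
    z ∈ pvMergeUnion xs ys ↔ z ∈ xs ∨ z ∈ ys := by
  fun_induction pvMergeUnion xs ys with
  | case1 => simp
  | case2 => simp
  | case3 x xs y ys hlt ih => simp_all; tauto
  | case4 x xs y ys hnlt hlt ih => simp_all; tauto
  | case5 x xs y ys hnlt hnlt' ih =>
    have hxy : x = y := le_antisymm (not_lt.1 hnlt') (not_lt.1 hnlt)
    subst hxy
    simp_all; tauto

theorem pv_pairwise_mergeUnion (xs ys : List Int)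
    (hx : xs.Pairwise (· < ·)) (hy : ys.Pairwise (· < ·)) :
    (pvMergeUnion xs ys).Pairwise (· < ·) := by
  fun_induction pvMergeUnion xs ys with
  | case1 => exact hy
  | case2 => exact hx
  | case3 x xs y ys hlt ih =>
    rw [List.pairwise_cons] at hx ⊢
    refine ⟨fun z hz => ?_, ih hx.2 hy⟩
    rcases (pv_mem_mergeUnion _ _ _).1 hz with h | h
    · exact hx.1 z h
    · rcases List.mem_cons.1 h with rfl | h
      · exact hlt
      · exact lt_trans hlt ((List.pairwise_cons.1 hy).1 z h)
  | case4 x xs y ys hnlt hlt ih =>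
    rw [List.pairwise_cons] at hy ⊢
    refine ⟨fun z hz => ?_, ih hx hy.2⟩
    rcases (pv_mem_mergeUnion _ _ _).1 hz with h | h
    · rcases List.mem_cons.1 h with rfl | h
      · exact hlt
      · exact lt_trans hlt ((List.pairwise_cons.1 hx).1 z h)
    · exact hy.1 z h
  | case5 x xs y ys hnlt hnlt' ih =>
    have hxy : x = y := le_antisymm (not_lt.1 hnlt') (not_lt.1 hnlt)
    subst hxy
    rw [List.pairwise_cons] at hx hy ⊢
    refine ⟨fun z hz => ?_, ih hx.2 hy.2⟩
    rcases (pv_mem_mergeUnion _ _ _).1 hz with h | h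
    · exact hx.1 z h
    · exact hy.1 z h

theorem pv_pairwise_pyRange (a b : Int) :
    (PySem.List.pyRange a b).Pairwise (· < ·) := by
  by_cases h : a < b
  · have hn : (b - a).toNat = (b - (a + 1)).toNat + 1 := by omega
    rw [PySem.List.pyRange_one_cons h, List.pairwise_cons]
    refine ⟨fun z hz => ?_, ?_⟩
    · have := PySem.List.mem_pyRange_one.1 hz; omega
    · exact pv_pairwise_pyRange (a + 1) b
  · have : PySem.List.pyRange a b = [] := by
      apply List.eq_nil_iff_forall_not_mem.2
      intro z hz
      have := PySem.List.mem_pyRange_one.1 hz; omega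
    rw [this]; exact List.Pairwise.nil
termination_by (b - a).toNat
decreasing_by omega

theorem pv_mem_foldl_addIf (tp : Int) (l : List Int) (s : PySem.Set Int) (x : Int) :
    x ∈ l.foldl (fun s i => if 1 ≤ i ∧ i ≤ tp then PySem.Set.add s i else s) s ↔
      x ∈ s ∨ (x ∈ l ∧ 1 ≤ x ∧ x ≤ tp) := by
  induction l generalizing s with
  | nil => simp
  | cons a l ih =>
    rw [List.foldl_cons, ih]
    split_ifs with h
    · rw [PySem.Set.mem_add]
      constructor
      · rintro ((hs | rfl) | ⟨hl, hb⟩)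
        · exact Or.inl hs
        · exact Or.inr ⟨List.mem_cons_self .., h⟩
        · exact Or.inr ⟨List.mem_cons_of_mem _ hl, hb⟩
      · rintro (hs | ⟨hl, hb⟩)
        · exact Or.inl (Or.inl hs)
        · rcases List.mem_cons.1 hl with rfl | hl
          · exact Or.inl (Or.inr rfl)
          · exact Or.inr ⟨hl, hb⟩
    · constructor
      · rintro (hs | ⟨hl, hb⟩)
        · exact Or.inl hs
        · exact Or.inr ⟨List.mem_cons_of_mem _ hl, hb⟩
      · rintro (hs | ⟨hl, hb⟩)
        · exact Or.inl hs
        · rcases List.mem_cons.1 hl with rfl | hl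
          · exact absurd hb h
          · exact Or.inr ⟨hl, hb⟩

theorem pv_nodup_foldl_addIf (tp : Int) (l : List Int) (s : PySem.Set Int) (hs : s.Nodup) :
    (l.foldl (fun s i => if 1 ≤ i ∧ i ≤ tp then PySem.Set.add s i else s) s).Nodup := by
  induction l generalizing s with
  | nil => exact hs
  | cons a l ih =>
    rw [List.foldl_cons]
    split_ifs with h
    · exact ih _ (PySem.Set.nodup_add _ _ hs)
    · exact ih _ hs

theorem pv_mem_alt (cp tp x : Int) :
    x ∈ get_displayed_page_numbers_alt cp tp ↔
      (1 ≤ x ∧ x ≤ tp) ∧ (x < 3 ∨ tp - 1 ≤ x ∨ (cp - 2 ≤ x ∧ x ≤ cp + 2)) := by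
  unfold get_displayed_page_numbers_alt
  split_ifs with h0 h4 <;>
    simp [pv_mem_mergeUnion, PySem.List.mem_pyRange_one] <;> omega

theorem pv_pairwise_alt (cp tp : Int) :
    (get_displayed_page_numbers_alt cp tp).Pairwise (· < ·) := by
  unfold get_displayed_page_numbers_alt
  split_ifs with h0 h4
  · exact List.Pairwise.nil
  · exact pv_pairwise_mergeUnion _ _ (pv_pairwise_pyRange _ _) (pv_pairwise_pyRange _ _)
  · refine pv_pairwise_mergeUnion _ _ ?_ (pv_pairwise_pyRange _ _)
    simp only [List.pairwise_cons, List.mem_cons, List.not_mem_nil, or_false]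
    refine ⟨fun z hz => ?_, fun z hz => ?_, fun z hz => ?_, fun z hz => hz.elim,
      List.Pairwise.nil⟩
    · rcases hz with rfl | rfl | rfl <;> omega
    · rcases hz with rfl | rfl <;> omega
    · rcases hz with rfl; omega

-- ===== VERDICT (by name: the statement is the Claim_ definition above) =====
theorem get_displayed_page_numbers_spec : Claim_equal_get_displayed_page_numbers := by
  intro cp tp _
  unfold Spec_get_displayed_page_numbers get_displayed_page_numbers
  refine PySem.List.sorted_eq_of_perm_of_pairwise_lt _ _ _ ?_ (pv_pairwise_alt cp tp)
  refine (List.perm_ext_iff_of_nodup ((pv_pairwise_alt cp tp).imp ne_of_lt)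
    (pv_nodup_foldl_addIf tp _ _ (pv_nodup_foldl_addIf tp _ _
      (pv_nodup_foldl_addIf tp _ _ List.nodup_nil)))).2 ?_
  intro a
  rw [pv_mem_alt, pv_mem_foldl_addIf, pv_mem_foldl_addIf, pv_mem_foldl_addIf]
  simp only [List.not_mem_nil, false_or, PySem.List.mem_pyRange_one]
  omega
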